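-- pv_equiv track=rewrite | github.com/sergiokv13/advent-of-code | advent-2021/day_19/day_19.py | get_variants
-- ===== SOURCE A (Python) =====
-- from itertools import permutations
--
-- def build_by_cols(xc, yc, zc):
--     return [(x, y, z) for x,y,z in zip(xc, yc, zc)]
--
-- def change_sign(col):
--     return [(el * -1) for el in col]
--
-- def get_variants(locations):
--     variants = []
--     x_col = [loc[0] for loc in locations]
--     y_col = [loc[1] for loc in locations]
--     z_col = [loc[2] for loc in locations]
--     count = 0
--     # todo remove repeated variants (*2)
--     for x,y,z in list(permutations([x_col,y_col,z_col])):
--         for changed_x in [x, change_sign(x)]: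
--             for changed_y in [y, change_sign(y)]:
--                 for changed_z in [z, change_sign(z)]:
--                     variants.append(build_by_cols(changed_x, changed_y, changed_z))
--     return variants
-- ===== SOURCE B (Python) =====
-- from itertools import permutations, product
--
-- def get_variants(locations):
--     return [[(loc[i] * sx, loc[j] * sy, loc[k] * sz) for loc in locations]
--             for (i, j, k) in permutations((0, 1, 2))
--             for (sx, sy, sz) in product((1, -1), repeat=3)]
-- ===== Notes on version B (the rewrite author's own statement) =====
-- stated objective: simpler
-- what changed: B transforms each point directly via index permutations and sign tuples in one comprehension, eliminating A's column extraction, whole-column negation and zip-back helpers.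
import Mathlib
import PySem

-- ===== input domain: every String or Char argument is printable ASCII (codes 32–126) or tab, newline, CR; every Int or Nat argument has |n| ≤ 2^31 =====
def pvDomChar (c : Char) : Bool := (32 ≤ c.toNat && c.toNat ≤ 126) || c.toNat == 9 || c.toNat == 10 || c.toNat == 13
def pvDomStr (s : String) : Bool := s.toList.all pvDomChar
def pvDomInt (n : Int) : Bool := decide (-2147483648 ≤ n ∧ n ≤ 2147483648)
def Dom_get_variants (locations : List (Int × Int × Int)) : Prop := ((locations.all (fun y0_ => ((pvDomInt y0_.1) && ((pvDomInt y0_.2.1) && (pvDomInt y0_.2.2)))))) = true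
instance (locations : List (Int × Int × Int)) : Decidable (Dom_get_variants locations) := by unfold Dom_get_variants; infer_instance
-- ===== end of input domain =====

-- B replaces A's column transpose/negate/zip-back pipeline by a direct per-point transform; objective: simpler.

-- ===== PORT A =====
def build_by_cols (xc yc zc : List Int) : List (Int × Int × Int) :=
  ((xc.zip yc).zip zc).map (fun p => (p.1.1, p.1.2, p.2))

def change_sign (col : List Int) : List Int :=
  col.map (fun el => el * -1)

-- itertools.permutations of the 3-element column list, transliterated in itertools order
def get_variants (locations : List (Int × Int × Int)) : List (List (Int × Int × Int)) :=
  let x_col := locations.map (fun loc => loc.1)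
  let y_col := locations.map (fun loc => loc.2.1)
  let z_col := locations.map (fun loc => loc.2.2)
  let perms : List (List Int × List Int × List Int) :=
    [(x_col, y_col, z_col), (x_col, z_col, y_col), (y_col, x_col, z_col),
     (y_col, z_col, x_col), (z_col, x_col, y_col), (z_col, y_col, x_col)]
  perms.foldl (fun variants xyz =>
    [xyz.1, change_sign xyz.1].foldl (fun v cx =>
      [xyz.2.1, change_sign xyz.2.1].foldl (fun v cy =>
        [xyz.2.2, change_sign xyz.2.2].foldl (fun v cz =>
          v ++ [build_by_cols cx cy cz]) v) v) variants) []

-- ===== PORT B =====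
-- loc[i] for i ∈ {0,1,2} on a 3-tuple
def tupGet (loc : Int × Int × Int) (i : Nat) : Int :=
  if i = 0 then loc.1 else if i = 1 then loc.2.1 else loc.2.2

def get_variants_alt (locations : List (Int × Int × Int)) : List (List (Int × Int × Int)) :=
  ([(0,1,2), (0,2,1), (1,0,2), (1,2,0), (2,0,1), (2,1,0)] : List (Nat × Nat × Nat)).flatMap
    (fun ijk =>
      ([(1,1,1), (1,1,-1), (1,-1,1), (1,-1,-1), (-1,1,1), (-1,1,-1), (-1,-1,1), (-1,-1,-1)] :
          List (Int × Int × Int)).map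
        (fun s => locations.map (fun loc =>
          (tupGet loc ijk.1 * s.1, tupGet loc ijk.2.1 * s.2.1, tupGet loc ijk.2.2 * s.2.2))))

-- ===== PRECONDITION & SPEC =====
def Spec_get_variants (locations : List (Int × Int × Int)) (out : List (List (Int × Int × Int))) : Prop := out = get_variants_alt locations
instance (locations : List (Int × Int × Int)) (out : List (List (Int × Int × Int))) : Decidable (Spec_get_variants locations out) := by unfold Spec_get_variants; infer_instance

-- ===== CLAIM (what is proved, stated in full; the proofs are below) =====
def Claim_equal_get_variants : Prop := ∀ (locations : List (Int × Int × Int)), Dom_get_variants locations → Spec_get_variants locations (get_variants locations)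

-- ===== LEMMAS AND PROOFS =====

theorem build_by_cols_map (f g h : (Int × Int × Int) → Int) (L : List (Int × Int × Int)) :
    build_by_cols (L.map f) (L.map g) (L.map h) = L.map (fun p => (f p, g p, h p)) := by
  induction L with
  | nil => rfl
  | cons p t ih =>
    simp only [build_by_cols, List.map_cons, List.zip_cons_cons] at ih ⊢
    rw [ih]

theorem change_sign_map (f : (Int × Int × Int) → Int) (L : List (Int × Int × Int)) :
    change_sign (L.map f) = L.map (fun p => f p * -1) := by
  simp [change_sign, List.map_map, Function.comp]

-- ===== VERDICT (by name: the statement is the Claim_ definition above) =====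
theorem get_variants_spec : Claim_equal_get_variants := by
  intro L _
  show get_variants L = get_variants_alt L
  simp only [get_variants, get_variants_alt, List.foldl, List.flatMap, List.map,
    change_sign_map, build_by_cols_map, tupGet, List.nil_append, List.cons_append, mul_one]
  rfl
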